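-- pv_equiv track=rewrite | github.com/fsbravo/advent | day9/stream.py | count_garbage
-- ===== SOURCE A (Python) =====
-- def count_garbage(data):
-- 	count = 0
-- 	depth = 0
-- 	in_garbage = False
-- 	i = 0
-- 	while True and i < len(data):
-- 		c = data[i]
-- 		if in_garbage:
-- 			if c == '!':
-- 				i += 2
-- 				continue
-- 			if c == '>':
-- 				in_garbage = False
-- 				continue
-- 			count += 1
-- 		else:
-- 			if c == '{':
-- 				depth += 1
-- 			elif c == '<':
-- 				in_garbage = True
-- 			elif c == '}':
-- 				depth -= 1
-- 		i += 1
-- 	return count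
-- ===== SOURCE B (Python) =====
-- import re
--
-- def count_garbage(data):
--     # regex scan: each garbage region starts at '<', consumes escape pairs '!x'
--     # or non-'>' chars, and ends at an optional '>'; escapes are then stripped.
--     total = 0
--     for m in re.finditer(r'<((?:![\s\S]|[^>])*)>?', data):
--         total += len(re.sub(r'![\s\S]?', '', m.group(1)))
--     return total
-- ===== Notes on version B (the rewrite author's own statement) =====
-- stated objective: idiomatic
-- what changed: Replaced the explicit index-based while-loop state machine (manual i skipping, in_garbage/depth flags) by a regex scan: finditer captures each garbage region and a sub strips escape pairs before counting, dropping the unused depth variable.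
import Mathlib
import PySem

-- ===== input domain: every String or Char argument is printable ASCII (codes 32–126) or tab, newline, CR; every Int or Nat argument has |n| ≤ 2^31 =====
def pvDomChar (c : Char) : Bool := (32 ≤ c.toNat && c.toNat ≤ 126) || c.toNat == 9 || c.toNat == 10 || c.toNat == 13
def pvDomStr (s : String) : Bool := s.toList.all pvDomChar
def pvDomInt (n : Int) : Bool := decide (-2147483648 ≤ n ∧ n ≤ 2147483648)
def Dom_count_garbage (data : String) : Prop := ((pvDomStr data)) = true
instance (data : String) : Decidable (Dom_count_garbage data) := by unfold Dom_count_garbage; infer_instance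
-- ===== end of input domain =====

-- B replaces A's explicit index state machine by a regex scan over garbage regions (objective: idiomatic).

-- ===== PORT A =====
-- A's while loop over an index i with state (count, depth, in_garbage); the '>' branch
-- clears in_garbage without advancing i (the '>' is re-read outside garbage), '!' skips 2.
def pvLoopA (cs : List Char) (count depth : Int) (inG : Bool) (i : Nat) : Int :=
  if h : i < cs.length then
    let c := cs[i]
    if inG then
      if c = '!' then pvLoopA cs count depth inG (i + 2)
      else if c = '>' then pvLoopA cs count depth false i
      else pvLoopA cs (count + 1) depth inG (i + 1)
    else
      if c = '{' then pvLoopA cs count (depth + 1) inG (i + 1)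
      else if c = '<' then pvLoopA cs count depth true (i + 1)
      else if c = '}' then pvLoopA cs count (depth - 1) inG (i + 1)
      else pvLoopA cs count depth inG (i + 1)
  else count
termination_by (cs.length - i, if inG then 1 else 0)
decreasing_by all_goals (simp_all; omega)

def count_garbage (data : String) : Int := pvLoopA data.toList 0 0 false 0

-- ===== PORT B =====
-- Hand port of Source B's two regex calls (PySem has no regex engine); exact because the pattern
-- is deterministic: the group (?:![\s\S]|[^>])* cannot consume a bare '>', so it extends
-- greedily to the first unescaped '>' (then taken by '>?') or to the end of the input.
-- pvGroup l = (the group captured by r'<((?:![\s\S]|[^>])*)>?' matched at l, the rest after the match)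
def pvGroup : List Char → List Char × List Char
  | [] => ([], [])
  | c :: rest =>
    if c = '!' then
      match rest with
      | [] => ([c], [])                -- lone '!': taken by [^>]
      | x :: rest' =>
        let p := pvGroup rest'
        (c :: x :: p.1, p.2)           -- escape pair '!x'
    else if c = '>' then ([], rest)     -- star stops; '>?' consumes the '>'
    else
      let p := pvGroup rest
      (c :: p.1, p.2)

-- re.sub(r'![\s\S]?', '', g): delete each '!' together with the following char, if any
def pvSub : List Char → List Char
  | [] => []
  | c :: rest =>
    if c = '!' then
      match rest with
      | [] => []
      | _ :: rest' => pvSub rest'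
    else c :: pvSub rest

-- needed by pvFind's termination: the rest after a regex match is no longer than the input
theorem pvGroup_snd_le : ∀ l : List Char, (pvGroup l).2.length ≤ l.length := by
  intro l
  induction l using pvGroup.induct with
  | case1 => simp [pvGroup]
  | case2 =>
    conv_lhs => rw [pvGroup.eq_def]
    simp
  | case3 x rest' ih =>
    conv_lhs => rw [pvGroup.eq_def]
    simp only [if_pos rfl]
    simpa using le_trans ih (by omega)
  | case4 rest' h =>
    conv_lhs => rw [pvGroup.eq_def]
    simp
  | case5 x rest' h1 h2 ih =>
    conv_lhs => rw [pvGroup.eq_def]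
    simp only [if_neg h1, if_neg h2]
    simpa using le_trans ih (by omega)

-- re.finditer: scan for '<', capture the group, sum len(re.sub(...)) over the matches
def pvFind : List Char → Int
  | [] => 0
  | c :: rest =>
    if c = '<' then
      ((pvSub (pvGroup rest).1).length : Int) + pvFind (pvGroup rest).2
    else pvFind rest
termination_by l => l.length
decreasing_by
  · exact Nat.lt_succ_of_le (pvGroup_snd_le rest)
  · simp

def count_garbage_alt (data : String) : Int := pvFind data.toList

-- ===== PRECONDITION & SPEC =====
def Spec_count_garbage (data : String) (out : Int) : Prop := out = count_garbage_alt data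
instance (data : String) (out : Int) : Decidable (Spec_count_garbage data out) := by unfold Spec_count_garbage; infer_instance

-- ===== CLAIM (what is proved, stated in full; the proofs are below) =====
def Claim_equal_count_garbage : Prop := ∀ (data : String), Dom_count_garbage data → Spec_count_garbage data (count_garbage data)

-- ===== LEMMAS AND PROOFS =====

-- shape lemmas for pvGroup / pvSub / pvFind
theorem pvGroup_bang (x : Char) (r : List Char) :
    pvGroup ('!' :: x :: r) = ('!' :: x :: (pvGroup r).1, (pvGroup r).2) := by
  conv_lhs => rw [pvGroup.eq_def]
  simp
theorem pvGroup_lone : pvGroup ['!'] = (['!'], []) := by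
  conv_lhs => rw [pvGroup.eq_def]
  simp
theorem pvGroup_gt (r : List Char) : pvGroup ('>' :: r) = ([], r) := by
  conv_lhs => rw [pvGroup.eq_def]
  simp
theorem pvGroup_other (c : Char) (r : List Char) (h1 : ¬c = '!') (h2 : ¬c = '>') :
    pvGroup (c :: r) = (c :: (pvGroup r).1, (pvGroup r).2) := by
  conv_lhs => rw [pvGroup.eq_def]
  simp [h1, h2]
theorem pvSub_bang (x : Char) (r : List Char) : pvSub ('!' :: x :: r) = pvSub r := by
  conv_lhs => rw [pvSub.eq_def]
  simp
theorem pvSub_other (c : Char) (r : List Char) (h : ¬c = '!') :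
    pvSub (c :: r) = c :: pvSub r := by
  conv_lhs => rw [pvSub.eq_def]
  simp [h]
theorem pvFind_cons_lt (r : List Char) :
    pvFind ('<' :: r) = ((pvSub (pvGroup r).1).length : Int) + pvFind (pvGroup r).2 := by
  conv_lhs => rw [pvFind.eq_def]
  simp
theorem pvFind_cons_ne (c : Char) (r : List Char) (h : ¬c = '<') :
    pvFind (c :: r) = pvFind r := by
  conv_lhs => rw [pvFind.eq_def]
  simp [h]

-- B's value of a suffix that starts inside garbage
def pvGarb (l : List Char) : Int :=
  ((pvSub (pvGroup l).1).length : Int) + pvFind (pvGroup l).2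

theorem drop_eq_cons (cs : List Char) (i : Nat) (h : i < cs.length) :
    cs.drop i = cs[i] :: cs.drop (i + 1) :=
  List.drop_eq_getElem_cons h

-- loop invariant: A's loop from index i equals count plus B's value of the suffix cs.drop i
theorem loopA_eq (cs : List Char) (count depth : Int) (inG : Bool) (i : Nat) :
    pvLoopA cs count depth inG i =
      count + (if inG then pvGarb (cs.drop i) else pvFind (cs.drop i)) := by
  induction count, depth, inG, i using pvLoopA.induct cs with
  | case1 count depth i h c hc ih =>
    -- in garbage, c = '!'
    have hc' : cs[i] = '!' := hc
    rw [pvLoopA]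
    simp only [h, dif_pos, hc', if_pos, if_true, ite_true]
    rw [ih, drop_eq_cons cs i h, hc']
    simp only [if_true]
    by_cases h2 : i + 1 < cs.length
    · rw [drop_eq_cons cs (i+1) h2]
      simp only [pvGarb, pvGroup_bang, pvSub_bang]
    · have e1 : cs.drop (i+1) = [] := List.drop_eq_nil_of_le (by omega)
      have e2 : cs.drop (i+2) = [] := List.drop_eq_nil_of_le (by omega)
      rw [e1, e2]
      simp [pvGarb, pvGroup_lone, pvGroup, pvSub, pvFind]
  | case2 count depth i h c hc1 hc2 ih =>
    -- in garbage, c = '>'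
    have hc1' : ¬cs[i] = '!' := hc1
    have hc2' : cs[i] = '>' := hc2
    rw [pvLoopA]
    simp only [h, dif_pos, hc1', hc2', if_neg, if_pos, if_true, ite_false, not_false_iff, ite_true]
    rw [ih, drop_eq_cons cs i h, hc2']
    simp [pvGarb, pvGroup_gt, pvSub, pvFind]
  | case3 count depth i h c hc1 hc2 ih =>
    -- in garbage, plain char: counted
    have hc1' : ¬cs[i] = '!' := hc1
    have hc2' : ¬cs[i] = '>' := hc2
    rw [pvLoopA]
    simp only [h, dif_pos, hc1', hc2', if_neg, if_true, ite_false, not_false_iff, ite_true]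
    rw [ih, drop_eq_cons cs i h]
    simp only [if_true, ite_true, pvGarb, pvGroup_other _ _ hc1' hc2', pvSub_other _ _ hc1']
    simp
    ring
  | case4 count depth inG i h c hG hc ih =>
    -- outside, c = '{'
    have hG' : inG = false := by simpa using hG
    have hc' : cs[i] = '{' := hc
    subst hG'
    rw [pvLoopA]
    simp only [h, dif_pos, hc', if_pos, Bool.false_eq_true, if_false, ite_false]
    rw [ih, drop_eq_cons cs i h, hc', pvFind_cons_ne _ _ (by decide)]
    simp
  | case5 count depth inG i h c hG hc1 hc2 ih =>
    -- outside, c = '<': enter garbage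
    have hG' : inG = false := by simpa using hG
    have hc1' : ¬cs[i] = '{' := hc1
    have hc2' : cs[i] = '<' := hc2
    subst hG'
    rw [pvLoopA]
    simp only [h, dif_pos, hc1', hc2', if_neg, if_pos, Bool.false_eq_true, if_false, if_true,
      ite_false, not_false_iff, ite_true]
    rw [ih, drop_eq_cons cs i h, hc2', pvFind_cons_lt]
    simp [pvGarb]
  | case6 count depth inG i h c hG hc1 hc2 hc3 ih =>
    -- outside, c = '}'
    have hG' : inG = false := by simpa using hG
    have hc1' : ¬cs[i] = '{' := hc1
    have hc2' : ¬cs[i] = '<' := hc2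
    have hc3' : cs[i] = '}' := hc3
    subst hG'
    rw [pvLoopA]
    simp only [h, dif_pos, hc1', hc2', hc3', if_neg, if_pos, Bool.false_eq_true, if_false,
      ite_false, not_false_iff]
    rw [ih, drop_eq_cons cs i h, hc3', pvFind_cons_ne _ _ (by decide)]
    simp
  | case7 count depth inG i h c hG hc1 hc2 hc3 ih =>
    -- outside, other char
    have hG' : inG = false := by simpa using hG
    have hc1' : ¬cs[i] = '{' := hc1
    have hc2' : ¬cs[i] = '<' := hc2
    have hc3' : ¬cs[i] = '}' := hc3
    subst hG'
    rw [pvLoopA]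
    simp only [h, dif_pos, hc1', hc2', hc3', if_neg, Bool.false_eq_true, if_false,
      ite_false, not_false_iff]
    rw [ih, drop_eq_cons cs i h, pvFind_cons_ne _ _ hc2']
    simp
  | case8 count depth inG i h =>
    rw [pvLoopA]
    have e : cs.drop i = [] := List.drop_eq_nil_of_le (by omega)
    simp [h, e, pvGarb, pvGroup, pvSub, pvFind]

-- ===== VERDICT (by name: the statement is the Claim_ definition above) =====
theorem count_garbage_spec : Claim_equal_count_garbage := by
  intro data _
  unfold Spec_count_garbage count_garbage count_garbage_alt
  rw [loopA_eq]
  simp
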